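-- pv_equiv track=rewrite | github.com/ddu0422/study | algorithm/baekjoon/greedy/silver1/1105.py | solution
-- ===== SOURCE A (Python) =====
-- def solution(l, r):
--     if len(r) > len(l):
--         return 0
--
--     carry_bit = False
--     answer = 0
--
--     for i, j in zip(l, r):
--         if not carry_bit and i != j:
--             carry_bit = True
--
--         if i == '8' and j == '8' and not carry_bit:
--             answer += 1
--
--     return answer
-- ===== SOURCE B (Python) =====
-- def solution(l, r):
--     if len(r) > len(l):
--         return 0
--     return sum(1 for i in range(len(r)) if l[i] == '8' and l[:i+1] == r[:i+1])
-- ===== Notes on version B (the rewrite author's own statement) =====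
-- stated objective: alternative
-- what changed: Replaces the single flag-driven scan with a per-position formulation: for every index i it tests full prefix equality l[:i+1] == r[:i+1] and counts the positions holding '8', so no mismatch flag or boundary is ever computed.
import Mathlib
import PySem

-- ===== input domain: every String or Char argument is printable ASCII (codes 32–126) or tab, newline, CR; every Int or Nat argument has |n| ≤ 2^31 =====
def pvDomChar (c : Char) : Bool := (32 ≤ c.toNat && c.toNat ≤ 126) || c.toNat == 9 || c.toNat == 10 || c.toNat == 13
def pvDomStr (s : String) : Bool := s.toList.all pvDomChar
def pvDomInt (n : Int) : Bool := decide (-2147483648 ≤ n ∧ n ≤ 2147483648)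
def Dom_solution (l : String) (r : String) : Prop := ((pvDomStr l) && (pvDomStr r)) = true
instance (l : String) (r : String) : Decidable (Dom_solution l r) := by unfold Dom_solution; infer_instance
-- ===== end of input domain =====

-- B change: instead of one flag-driven scan, B counts every position i whose char is '8'
-- and whose full prefixes l[:i+1], r[:i+1] coincide (a per-position prefix-equality test).

-- ===== PORT A =====
-- the 'for i, j in zip(l, r)' loop with state (carry_bit, answer)
def solutionLoop : List (Char × Char) → Bool → Int → Int
  | [], _, answer => answer
  | (i, j) :: rest, carry, answer =>
    let carry' := if ¬carry ∧ i ≠ j then true else carry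
    let answer' := if i = '8' ∧ j = '8' ∧ ¬carry' then answer + 1 else answer
    solutionLoop rest carry' answer'

def solution (l : String) (r : String) : Int :=
  if r.toList.length > l.toList.length then 0
  else solutionLoop (l.toList.zip r.toList) false 0

-- ===== PORT B =====
-- 'sum(1 for i in range(len(r)) if l[i] == '8' and l[:i+1] == r[:i+1])'
-- (l[i] is in range here since i < len(r) ≤ len(l), so getD's default is never used)
def solution_alt (l : String) (r : String) : Int :=
  if r.toList.length > l.toList.length then 0
  else (List.range r.toList.length).foldl
    (fun acc i =>
      if l.toList.getD i ' ' = '8' ∧ l.toList.take (i + 1) = r.toList.take (i + 1)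
      then acc + 1 else acc) 0

-- ===== PRECONDITION & SPEC =====
def Spec_solution (l : String) (r : String) (out : Int) : Prop := out = solution_alt l r
instance (l : String) (r : String) (out : Int) : Decidable (Spec_solution l r out) := by unfold Spec_solution; infer_instance

-- ===== CLAIM (what is proved, stated in full; the proofs are below) =====
def Claim_equal_solution : Prop := ∀ (l : String) (r : String), Dom_solution l r → Spec_solution l r (solution l r)

-- ===== LEMMAS AND PROOFS =====

-- length of the common prefix of the zipped pair lists (proof-side characterisation)
def commonLen : List (Char × Char) → Nat
  | [] => 0
  | (a, b) :: rest => if a = b then commonLen rest + 1 else 0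

-- once carry is set, the answer never changes
theorem solutionLoop_true (zl : List (Char × Char)) (ans : Int) :
    solutionLoop zl true ans = ans := by
  induction zl generalizing ans with
  | nil => rfl
  | cons p rest ih =>
    obtain ⟨i, j⟩ := p
    simp [solutionLoop, ih]

-- A's loop counts the '8's in the common prefix
theorem solutionLoop_eq (l r : List Char) (ans : Int) :
    solutionLoop (l.zip r) false ans
      = ans + ((l.take (commonLen (l.zip r))).count '8' : Int) := by
  induction l generalizing r ans with
  | nil => simp [solutionLoop]
  | cons a ls ih =>
    cases r with
    | nil => simp [solutionLoop, commonLen]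
    | cons b rs =>
      by_cases hab : a = b
      · subst hab
        by_cases h8 : a = '8'
        · simp [solutionLoop, commonLen, h8, ih rs]
          ring
        · simp [solutionLoop, commonLen, h8, ih rs]
      · simp [solutionLoop, commonLen, hab, solutionLoop_true]

theorem commonLen_le (l r : List Char) :
    commonLen (l.zip r) ≤ min l.length r.length := by
  induction l generalizing r with
  | nil => simp [commonLen]
  | cons a ls ih =>
    cases r with
    | nil => simp [commonLen]
    | cons b rs =>
      by_cases hab : a = b <;>
        simp [commonLen, hab, ih rs]

-- prefix equality at i+1 ↔ i is below the common-prefix length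
theorem take_eq_iff (l r : List Char) (i : Nat) (hi : i < l.length) (hr : i < r.length) :
    (l.take (i + 1) = r.take (i + 1)) ↔ i < commonLen (l.zip r) := by
  induction l generalizing r i with
  | nil => simp at hi
  | cons a ls ih =>
    cases r with
    | nil => simp at hr
    | cons b rs =>
      cases i with
      | zero =>
        by_cases hab : a = b <;> simp [commonLen, hab]
      | succ k =>
        by_cases hab : a = b
        · subst hab
          have hz : commonLen ((a :: ls).zip (a :: rs)) = commonLen (ls.zip rs) + 1 := by
            simp [commonLen]
          rw [hz]
          simp only [List.take_succ_cons, List.cons.injEq, true_and]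
          rw [ih rs k (by simpa using hi) (by simpa using hr)]
          omega
        · simp [commonLen, hab]

-- B's fold counts the '8's in the common prefix, cut at m
theorem foldB_eq (l r : List Char) (hlr : r.length ≤ l.length) (m : Nat) (hm : m ≤ r.length) :
    (List.range m).foldl
      (fun acc i =>
        if l.getD i ' ' = '8' ∧ l.take (i + 1) = r.take (i + 1)
        then acc + 1 else acc) (0 : Int)
      = ((l.take (min m (commonLen (l.zip r)))).count '8' : Int) := by
  induction m with
  | zero => simp
  | succ k ih =>
    have hk : k ≤ r.length := Nat.le_of_succ_le hm
    have hkl : k < l.length := lt_of_lt_of_le (lt_of_lt_of_le (Nat.lt_succ_self k) hm) hlr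
    have hkr : k < r.length := lt_of_lt_of_le (Nat.lt_succ_self k) hm
    rw [List.range_succ, List.foldl_append, ih hk]
    simp only [List.foldl_cons, List.foldl_nil]
    have hget : l[k]? = some l[k] := List.getElem?_eq_getElem hkl
    simp only [take_eq_iff l r k hkl hkr]
    by_cases hc : k < commonLen (l.zip r)
    · have h1 : min k (commonLen (l.zip r)) = k := Nat.min_eq_left (Nat.le_of_lt hc)
      have h2 : min (k + 1) (commonLen (l.zip r)) = k + 1 := Nat.min_eq_left hc
      have ht : l.take (k + 1) = l.take k ++ [l[k]] := by
        rw [List.take_add_one, hget]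
        rfl
      have hcount : (List.count '8' (l.take (k + 1)) : Int)
          = (List.count '8' (l.take k) : Int) + (if l[k] = '8' then 1 else 0) := by
        rw [ht, List.count_append]
        by_cases h8 : l[k] = '8' <;> simp [h8]
      rw [h1, h2, hcount]
      by_cases h8 : l[k] = '8' <;> simp [List.getD, hget, h8, hc]

    · have h1 : min k (commonLen (l.zip r)) = commonLen (l.zip r) := by omega
      have h2 : min (k + 1) (commonLen (l.zip r)) = commonLen (l.zip r) := by omega
      simp [h1, h2, hc]

-- ===== VERDICT (by name: the statement is the Claim_ definition above) =====
theorem solution_spec : Claim_equal_solution := by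
  intro l r _
  unfold Spec_solution solution solution_alt
  split
  · rfl
  · rename_i h
    have hlr : r.toList.length ≤ l.toList.length := by omega
    rw [foldB_eq l.toList r.toList hlr r.toList.length le_rfl,
        solutionLoop_eq l.toList r.toList 0]
    have : min r.toList.length (commonLen (l.toList.zip r.toList))
        = commonLen (l.toList.zip r.toList) := by
      have := commonLen_le l.toList r.toList
      omega
    rw [this]
    ring
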